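-- pv_equiv track=rewrite | github.com/irrollforwardable/iwillbia | logic.py | _replace_non_empty_characters
-- ===== SOURCE A (Python) =====
-- def _replace_non_empty_characters(string, replacement):
--     result = ""
--     for char in string:
--         if char == " ":
--             result += " "
--         else:
--             result += replacement
--     return result
-- ===== SOURCE B (Python) =====
-- def _replace_non_empty_characters(string, replacement):
--     return " ".join(replacement * len(segment) for segment in string.split(" "))
-- ===== Notes on version B (the rewrite author's own statement) =====
-- stated objective: idiomatic
-- what changed: Replaces the char-by-char accumulator loop by splitting on single spaces, expanding each space-free segment with string repetition, and rejoining with ' '.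
import Mathlib
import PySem

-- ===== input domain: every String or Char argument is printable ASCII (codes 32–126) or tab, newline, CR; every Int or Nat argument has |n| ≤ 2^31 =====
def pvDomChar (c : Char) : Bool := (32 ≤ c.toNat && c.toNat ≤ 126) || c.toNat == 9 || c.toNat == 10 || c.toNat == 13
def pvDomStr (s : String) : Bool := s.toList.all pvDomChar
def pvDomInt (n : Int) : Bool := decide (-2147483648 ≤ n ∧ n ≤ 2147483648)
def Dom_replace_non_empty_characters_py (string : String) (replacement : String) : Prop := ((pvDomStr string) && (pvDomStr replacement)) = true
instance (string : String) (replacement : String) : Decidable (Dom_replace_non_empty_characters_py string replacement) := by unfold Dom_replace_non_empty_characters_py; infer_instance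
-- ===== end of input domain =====

-- B replaces the char-by-char accumulator loop by split(" ") / per-segment repetition / " ".join (idiomatic decomposition).

-- ===== PORT A =====
-- result = ""; for char in string: result += " " if char == " " else replacement
def replace_non_empty_characters_py (string : String) (replacement : String) : String :=
  String.ofList
    (string.toList.foldl
      (fun result char => result ++ (if char == ' ' then [' '] else replacement.toList)) [])

-- ===== PORT B =====
-- " ".join(replacement * len(segment) for segment in string.split(" "))
-- split(" ") with a single-char separator is List.splitOn ' '; replacement * n is PySem.List.pyRepeat; " ".join is List.intercalate [' ']
def replace_non_empty_characters_py_alt (string : String) (replacement : String) : String :=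
  String.ofList
    (List.intercalate [' ']
      ((string.toList.splitOn ' ').map
        (fun segment => PySem.List.pyRepeat replacement.toList (segment.length : Int))))

-- ===== PRECONDITION & SPEC =====
def Spec_replace_non_empty_characters_py (string : String) (replacement : String) (out : String) : Prop := out = replace_non_empty_characters_py_alt string replacement
instance (string : String) (replacement : String) (out : String) : Decidable (Spec_replace_non_empty_characters_py string replacement out) := by unfold Spec_replace_non_empty_characters_py; infer_instance

-- ===== CLAIM (what is proved, stated in full; the proofs are below) =====
def Claim_equal_replace_non_empty_characters_py : Prop := ∀ (string : String) (replacement : String), Dom_replace_non_empty_characters_py string replacement → Spec_replace_non_empty_characters_py string replacement (replace_non_empty_characters_py string replacement)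

-- ===== LEMMAS AND PROOFS =====

theorem pv_intercalate_cons_cons {α : Type} (sep x y : List α) (zs : List (List α)) :
    List.intercalate sep (x :: y :: zs) = x ++ sep ++ List.intercalate sep (y :: zs) := by
  simp [List.intercalate]

theorem pv_intercalate_nil_cons {α : Type} (sep : List α) (x : List α) (xs : List (List α)) :
    List.intercalate sep ([] :: x :: xs) = sep ++ List.intercalate sep (x :: xs) := by
  simp [pv_intercalate_cons_cons]

theorem pv_intercalate_prepend {α : Type} (sep a x : List α) (xs : List (List α)) :
    List.intercalate sep ((a ++ x) :: xs) = a ++ List.intercalate sep (x :: xs) := by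
  cases xs with
  | nil => simp [List.intercalate]
  | cons y ys => simp [pv_intercalate_cons_cons]

theorem pv_main (rep : List Char) (cs : List Char) :
    List.intercalate [' ']
        ((cs.splitOn ' ').map (fun seg => (List.replicate seg.length rep).flatten))
      = cs.flatMap (fun c => if c == ' ' then [' '] else rep) := by
  induction cs with
  | nil => simp [List.splitOn, List.splitOnP_nil, List.intercalate]
  | cons c cs ih =>
    rw [List.splitOn, List.splitOnP_cons]
    by_cases hc : c = ' '
    · subst hc
      simp only [beq_self_eq_true, if_true, List.map_cons]
      have hne : (cs.splitOn ' ').map (fun seg => (List.replicate seg.length rep).flatten) ≠ [] := by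
        simp [List.splitOn, List.splitOnP_ne_nil]
      obtain ⟨y, ys, hy⟩ := List.exists_cons_of_ne_nil hne
      rw [show List.splitOnP (· == ' ') cs = cs.splitOn ' ' from rfl, hy]
      simp only [List.length_nil, List.replicate_zero, List.flatten_nil]
      rw [pv_intercalate_nil_cons, ← hy, ih]
      simp
    · have hb : (c == ' ') = false := by simpa using hc
      simp only [hb]
      have hne : List.splitOnP (· == ' ') cs ≠ [] := List.splitOnP_ne_nil _ _
      obtain ⟨s0, S, hS⟩ := List.exists_cons_of_ne_nil hne
      rw [hS]
      simp only [Bool.false_eq_true, if_false, List.modifyHead_cons, List.map_cons]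
      have hexp : (List.replicate (c :: s0).length rep).flatten
          = rep ++ (List.replicate s0.length rep).flatten := by
        simp [List.replicate_succ]
      rw [hexp, pv_intercalate_prepend]
      have hmap : (List.replicate s0.length rep).flatten
            :: List.map (fun seg => (List.replicate seg.length rep).flatten) S
          = List.map (fun seg => (List.replicate seg.length rep).flatten) (List.splitOn ' ' cs) := by
        rw [List.splitOn, hS]; rfl
      rw [hmap, ih]
      simp only [List.flatMap_cons, hb, Bool.false_eq_true, if_false]

-- ===== VERDICT (by name: the statement is the Claim_ definition above) =====
theorem replace_non_empty_characters_py_spec : Claim_equal_replace_non_empty_characters_py := by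
  intro s r _
  unfold Spec_replace_non_empty_characters_py replace_non_empty_characters_py
    replace_non_empty_characters_py_alt
  rw [PySem.List.foldl_append_eq_flatMap]
  congr 1
  have : ∀ seg : List Char,
      PySem.List.pyRepeat r.toList (seg.length : Int) = (List.replicate seg.length r.toList).flatten := by
    intro seg; simp [PySem.List.pyRepeat]
  simp only [this]
  rw [pv_main]
  rfl
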